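-- pv_equiv track=rewrite | github.com/wyk18703232953/myResearch | codeComplex/data/filteredData/python/linear/python_linear_0786.py | is_winning_state
-- ===== SOURCE A (Python) =====
-- def is_winning_state(nims, n):
--     keys = set(nims)
--     counts = dict.fromkeys(keys, 0)
--     for nim in nims:
--         counts[nim] += 1
--     if 0 in keys and counts[0] > 1:
--         return True
--     lose_count = 0
--     for k in keys:
--         if counts[k] > 2:
--             return True
--         if counts[k] > 1 and (k - 1) in keys and counts[k - 1] > 0:
--             return True
--         if counts[k] > 1:
--             lose_count += 1
--     if lose_count > 1:
--         return True
--     return False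
-- ===== SOURCE B (Python) =====
-- def is_winning_state(nims, n):
--     s = sorted(nims)
--     dup = 0
--     i = 0
--     while i < len(s):
--         j = i
--         while j < len(s) and s[j] == s[i]:
--             j += 1
--         c = j - i
--         if c > 1:
--             if s[i] == 0 or c > 2 or (i > 0 and s[i - 1] == s[i] - 1):
--                 return True
--             dup += 1
--         i = j
--     return dup > 1
-- ===== Notes on version B (the rewrite author's own statement) =====
-- stated objective: alternative
-- what changed: Replaces A's set/dict counting passes and per-key predecessor membership tests with a sort of a copy followed by a single scan grouping consecutive equal values into runs, where 'k-1 present' becomes 'the element just before the run equals k-1'.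
import Mathlib
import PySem

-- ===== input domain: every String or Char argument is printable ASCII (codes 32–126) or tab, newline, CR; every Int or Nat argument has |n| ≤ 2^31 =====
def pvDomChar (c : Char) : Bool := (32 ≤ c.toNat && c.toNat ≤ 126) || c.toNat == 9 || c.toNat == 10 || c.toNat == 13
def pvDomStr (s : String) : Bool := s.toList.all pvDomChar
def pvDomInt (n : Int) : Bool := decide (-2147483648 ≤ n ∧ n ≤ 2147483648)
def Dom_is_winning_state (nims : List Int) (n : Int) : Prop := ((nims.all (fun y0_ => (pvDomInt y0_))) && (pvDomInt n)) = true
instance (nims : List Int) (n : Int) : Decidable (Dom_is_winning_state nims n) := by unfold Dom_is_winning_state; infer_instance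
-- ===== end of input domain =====

-- B replaces A's set/dict counting and per-key membership tests with sort-a-copy + one
-- run-grouping scan (objective: alternative; no argument is mutated by either version).

-- ===== PORT A =====
-- the 'for k in keys' loop with early returns and the lose_count accumulator
def aLoop (counts : PySem.Dict Int Int) (keys : List Int) : List Int → Int → Bool
  | [], lose_count => lose_count > 1
  | k :: ks, lose_count =>
    if counts.getD k 0 > 2 then true
    else if counts.getD k 0 > 1 ∧ (k - 1) ∈ keys ∧ counts.getD (k - 1) 0 > 0 then true
    else aLoop counts keys ks (if counts.getD k 0 > 1 then lose_count + 1 else lose_count)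

def is_winning_state (nims : List Int) (n : Int) : Bool :=
  let keys : PySem.Set Int := PySem.Set.ofList nims
  let counts0 : PySem.Dict Int Int := keys.foldl (fun d k => d.insert k 0) PySem.Dict.empty
  let counts : PySem.Dict Int Int := nims.foldl (fun d nim => d.modify nim 0 (· + 1)) counts0
  if 0 ∈ keys ∧ counts.getD 0 0 > 1 then true
  else aLoop counts keys keys 0

-- ===== PORT B =====
-- the outer while loop over the sorted copy: prev = s[i-1] (none when i = 0),
-- the inner while loop is the takeWhile/dropWhile run split, c is the run length
def bLoop : Option Int → Int → List Int → Bool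
  | _, dup, [] => dup > 1
  | prev, dup, v :: rest =>
    let c : Int := 1 + (rest.takeWhile (fun x => x == v)).length
    if c > 1 ∧ (v = 0 ∨ c > 2 ∨ prev = some (v - 1)) then true
    else bLoop (some v) (if c > 1 then dup + 1 else dup) (rest.dropWhile (fun x => x == v))
  termination_by _ _ l => l.length
  decreasing_by
    simp only [List.length_cons]
    exact Nat.lt_succ_of_le (List.length_dropWhile_le _ _)

def is_winning_state_alt (nims : List Int) (n : Int) : Bool :=
  bLoop none 0 (PySem.List.sorted nims (fun x => x) false)

-- ===== PRECONDITION & SPEC =====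
def Spec_is_winning_state (nims : List Int) (n : Int) (out : Bool) : Prop := out = is_winning_state_alt nims n
instance (nims : List Int) (n : Int) (out : Bool) : Decidable (Spec_is_winning_state nims n out) := by unfold Spec_is_winning_state; infer_instance

-- ===== CLAIM (what is proved, stated in full; the proofs are below) =====
def Claim_equal_is_winning_state : Prop := ∀ (nims : List Int) (n : Int), Dom_is_winning_state nims n → Spec_is_winning_state nims n (is_winning_state nims n)


-- ===== LEMMAS AND PROOFS =====

-- the common characterisation: 0 duplicated, some value tripled, a duplicated value with
-- its predecessor present, or at least two distinct duplicated values
def winSpec (l : List Int) : Prop :=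
  1 < (l.count 0 : Int) ∨ (∃ v ∈ l, 2 < (l.count v : Int))
  ∨ (∃ v ∈ l, 1 < (l.count v : Int) ∧ (v - 1) ∈ l)
  ∨ 1 < (l.toFinset.filter (fun v => 1 < (l.count v : Int))).card

theorem fromkeys0_getD (l : List Int) (d : PySem.Dict Int Int)
    (h : ∀ v, d.getD v 0 = 0) (v : Int) :
    (l.foldl (fun d k => d.insert k 0) d).getD v 0 = 0 := by
  induction l generalizing d with
  | nil => exact h v
  | cons k ks ih =>
    refine ih _ (fun w => ?_)
    by_cases hw : w = k
    · subst hw; exact PySem.Dict.getD_insert_self ..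
    · rw [PySem.Dict.getD_insert_of_ne _ _ _ hw]; exact h w

theorem counts_getD (nims : List Int) (v : Int) :
    ((nims.foldl (fun d nim => d.modify nim 0 (· + 1))
      ((PySem.Set.ofList nims).foldl (fun d k => d.insert k 0) PySem.Dict.empty))).getD v 0
    = (nims.count v : Int) := by
  rw [PySem.Dict.getD_foldl_modify_add_one,
    fromkeys0_getD _ _ (fun w => by simp [PySem.Dict.getD_empty]) v]
  ring

theorem aLoop_iff (counts : PySem.Dict Int Int) (keys : List Int) :
    ∀ (ks : List Int) (lc : Int),
    (aLoop counts keys ks lc = true) ↔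
      ((∃ k ∈ ks, 2 < counts.getD k 0 ∨
          (1 < counts.getD k 0 ∧ (k - 1) ∈ keys ∧ 0 < counts.getD (k - 1) 0))
        ∨ 1 < lc + ((ks.filter (fun k => decide (1 < counts.getD k 0))).length : Int)) := by
  intro ks
  induction ks with
  | nil => intro lc; simp [aLoop]
  | cons k ks ih =>
    intro lc
    rw [aLoop]
    have hf : ((List.filter (fun k => decide (1 < counts.getD k 0)) (k :: ks)).length : Int)
        = (if 1 < counts.getD k 0 then 1 else 0)
          + ((List.filter (fun k => decide (1 < counts.getD k 0)) ks).length : Int) := by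
      rw [List.filter_cons]
      by_cases hc : 1 < counts.getD k 0 <;> simp [hc] <;> omega
    by_cases h1 : counts.getD k 0 > 2
    · rw [if_pos h1]
      exact ⟨fun _ => Or.inl ⟨k, List.mem_cons_self .., Or.inl h1⟩, fun _ => rfl⟩
    rw [if_neg h1]
    by_cases h2 : counts.getD k 0 > 1 ∧ (k - 1) ∈ keys ∧ counts.getD (k - 1) 0 > 0
    · rw [if_pos h2]
      exact ⟨fun _ => Or.inl ⟨k, List.mem_cons_self .., Or.inr h2⟩, fun _ => rfl⟩
    rw [if_neg h2, ih, hf]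
    constructor
    · rintro (⟨w, hw, hc⟩ | hnum)
      · exact Or.inl ⟨w, List.mem_cons_of_mem _ hw, hc⟩
      · right; split_ifs at hnum ⊢ <;> omega
    · rintro (⟨w, hw, hc⟩ | hnum)
      · rcases List.mem_cons.mp hw with rfl | hw'
        · rcases hc with hc | hc
          · exact absurd hc h1
          · exact absurd hc h2
        · exact Or.inl ⟨w, hw', hc⟩
      · right; split_ifs at hnum ⊢ <;> omega

theorem ofList_toFinset (l : List Int) : (PySem.Set.ofList l).toFinset = l.toFinset := by
  ext x; simp [PySem.Set.mem_ofList]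

theorem ofList_filter_len (nims : List Int) :
    (((PySem.Set.ofList nims).filter (fun k => decide (1 < (nims.count k : Int)))).length : Int)
      = ((nims.toFinset.filter (fun v => 1 < (nims.count v : Int))).card : Int) := by
  rw [← List.toFinset_card_of_nodup ((PySem.Set.nodup_ofList (xs := nims)).filter _),
    List.toFinset_filter, ofList_toFinset]
  simp

theorem a_iff (nims : List Int) (n : Int) :
    is_winning_state nims n = true ↔ winSpec nims := by
  simp only [is_winning_state]
  split_ifs with h0
  · rw [counts_getD] at h0
    simp only [true_iff]
    unfold winSpec
    exact Or.inl h0.2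
  · rw [counts_getD] at h0
    simp only [PySem.Set.mem_ofList] at h0
    rw [aLoop_iff]
    simp only [counts_getD, PySem.Set.mem_ofList]
    rw [ofList_filter_len]
    unfold winSpec
    constructor
    · rintro (⟨v, hv, hc | ⟨hc1, hcm, _⟩⟩ | hnum)
      · exact Or.inr (Or.inl ⟨v, hv, hc⟩)
      · exact Or.inr (Or.inr (Or.inl ⟨v, hv, hc1, hcm⟩))
      · exact Or.inr (Or.inr (Or.inr (by omega)))
    · rintro (hz | ⟨v, hv, hc⟩ | ⟨v, hv, hc1, hcm⟩ | hcard)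
      · exact absurd ⟨List.count_pos_iff.mp (by exact_mod_cast (by omega : (0:Int) < (nims.count 0 : Int))), hz⟩ h0
      · exact Or.inl ⟨v, hv, Or.inl hc⟩
      · refine Or.inl ⟨v, hv, Or.inr ⟨hc1, hcm, ?_⟩⟩
        exact_mod_cast List.count_pos_iff.mpr hcm
      · right; omega

-- ----- B side -----

theorem dropWhile_lt (v : Int) (rest : List Int)
    (hs : rest.Pairwise (· ≤ ·)) (hge : ∀ x ∈ rest, v ≤ x) :
    ∀ x ∈ rest.dropWhile (fun x => x == v), v < x := by
  have hsubl : (rest.dropWhile (fun x => x == v)).Sublist rest := List.dropWhile_sublist ..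
  cases hd : rest.dropWhile (fun x => x == v) with
  | nil => simp
  | cons w tl =>
    intro x hx
    have hwmem : w ∈ rest := hsubl.mem (hd ▸ List.mem_cons_self ..)
    have hwne : w ≠ v := by
      have := List.head?_dropWhile_not (fun x => x == v) rest
      rw [hd] at this; simpa using this
    have hvw : v < w := lt_of_le_of_ne (hge w hwmem) (Ne.symm hwne)
    have hpw : (w :: tl).Pairwise (· ≤ ·) := hd ▸ (hs.sublist hsubl)
    rcases List.mem_cons.mp hx with rfl | hxtl
    · exact hvw
    · exact lt_of_lt_of_le hvw ((List.pairwise_cons.mp hpw).1 x hxtl)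

theorem bLoop_iff (N : Nat) :
    ∀ (t : List Int), t.length ≤ N → ∀ (prev : Option Int) (dup : Int),
    t.Pairwise (· ≤ ·) →
    (∀ p, prev = some p → ∀ x ∈ t, p < x) →
    (bLoop prev dup t = true ↔
      ((∃ v ∈ t, 1 < (t.count v : Int) ∧
          (v = 0 ∨ 2 < (t.count v : Int) ∨ prev = some (v - 1) ∨ (v - 1) ∈ t))
        ∨ 1 < dup + ((t.toFinset.filter (fun v => 1 < (t.count v : Int))).card : Int))) := by
  induction N with
  | zero =>
    intro t ht prev dup _ _
    have ht0 : t = [] := List.length_eq_zero_iff.mp (Nat.le_zero.mp ht)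
    subst ht0
    simp [bLoop]
  | succ N ih =>
    intro t ht prev dup hsort hprev
    cases t with
    | nil => simp [bLoop]
    | cons v rest =>
      have hsrest : rest.Pairwise (· ≤ ·) := (List.pairwise_cons.mp hsort).2
      have hge : ∀ x ∈ rest, v ≤ x := (List.pairwise_cons.mp hsort).1
      have hsplit : rest.takeWhile (fun x => x == v) ++ rest.dropWhile (fun x => x == v) = rest :=
        List.takeWhile_append_dropWhile ..
      have hrv : ∀ x ∈ rest.takeWhile (fun x => x == v), x = v := by
        intro x hx
        have := List.mem_takeWhile_imp hx; simpa using this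
      have hlt : ∀ x ∈ rest.dropWhile (fun x => x == v), v < x := dropWhile_lt v rest hsrest hge
      have hvnot : v ∉ rest.dropWhile (fun x => x == v) := fun h => lt_irrefl v (hlt v h)
      have hcv : ((v :: rest).count v : Int)
          = 1 + ((rest.takeWhile (fun x => x == v)).length : Int) := by
        have h1 : rest.count v = (rest.takeWhile (fun x => x == v)).length := by
          conv_lhs => rw [← hsplit]
          rw [List.count_append, List.count_eq_length.mpr (fun b hb => by simp [hrv b hb]),
            List.count_eq_zero.mpr hvnot]
          omega
        rw [List.count_cons_self, h1]
        push_cast; ring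
      have hcw : ∀ w, w ≠ v →
          (v :: rest).count w = (rest.dropWhile (fun x => x == v)).count w := by
        intro w hw
        have h1 : List.count w (v :: rest) = List.count w rest := by
          simp [Ne.symm hw]
        rw [h1]
        conv_lhs => rw [← hsplit]
        rw [List.count_append, List.count_eq_zero.mpr (fun h => hw (hrv w h))]
        omega
      have hmem : ∀ w, w ∈ (v :: rest) ↔ w = v ∨ w ∈ rest.dropWhile (fun x => x == v) := by
        intro w
        constructor
        · intro h
          rcases List.mem_cons.mp h with rfl | h'
          · exact Or.inl rfl
          · rcases List.mem_append.mp (hsplit ▸ h') with h'' | h''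
            · exact Or.inl (hrv w h'')
            · exact Or.inr h''
        · rintro (rfl | h')
          · exact List.mem_cons_self ..
          · exact List.mem_cons_of_mem _ (hsplit ▸ List.mem_append_right _ h')
      have hfin : (v :: rest).toFinset = insert v (rest.dropWhile (fun x => x == v)).toFinset := by
        ext w; simp only [List.mem_toFinset, Finset.mem_insert, hmem w]
      have hvfin : v ∉ (rest.dropWhile (fun x => x == v)).toFinset := by simpa using hvnot
      have hcongr : (rest.dropWhile (fun x => x == v)).toFinset.filter
            (fun w => 1 < (((v :: rest).count w : Nat) : Int))
          = (rest.dropWhile (fun x => x == v)).toFinset.filter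
            (fun w => 1 < (((rest.dropWhile (fun x => x == v)).count w : Nat) : Int)) := by
        apply Finset.filter_congr
        intro w hw
        have hwv : w ≠ v := fun h => hvfin (h ▸ hw)
        rw [hcw w hwv]
      have hcard : (((v :: rest).toFinset.filter (fun w => 1 < (((v :: rest).count w : Nat) : Int))).card : Int)
          = (if 1 < (((v :: rest).count v : Nat) : Int) then 1 else 0)
            + (((rest.dropWhile (fun x => x == v)).toFinset.filter
                (fun w => 1 < (((rest.dropWhile (fun x => x == v)).count w : Nat) : Int))).card : Int) := by
        rw [hfin, Finset.filter_insert]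
        split_ifs with hcc
        · rw [Finset.card_insert_of_notMem (fun h => hvfin (Finset.mem_of_mem_filter _ h)), hcongr]
          push_cast
          ring
        · rw [hcongr]; ring
      -- one step of bLoop
      rw [bLoop]
      have hlen' : (rest.dropWhile (fun x => x == v)).length ≤ N := by
        have h1 : (rest.dropWhile (fun x => x == v)).length ≤ rest.length :=
          (List.dropWhile_sublist ..).length_le
        simp only [List.length_cons] at ht
        omega
      have hsort' : (rest.dropWhile (fun x => x == v)).Pairwise (· ≤ ·) :=
        hsrest.sublist (List.dropWhile_sublist ..)
      have hprev' : ∀ p, (some v : Option Int) = some p →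
          ∀ x ∈ rest.dropWhile (fun x => x == v), p < x := by
        rintro p hp x hx
        cases hp
        exact hlt x hx
      have hprevlt : ∀ p, prev = some p → p < v := fun p hp => hprev p hp v (List.mem_cons_self ..)
      have hpredout : (v - 1) ∉ (v :: rest) := by
        intro h
        rcases (hmem _).mp h with h' | h'
        · omega
        · have := hlt _ h'; omega
      split_ifs with hcond hc3
      · simp only [true_iff]
        left
        refine ⟨v, List.mem_cons_self .., ?_, ?_⟩
        · omega
        · rcases hcond.2 with h | h | h
          · exact Or.inl h
          · exact Or.inr (Or.inl (by omega))
          · exact Or.inr (Or.inr (Or.inl h))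
      all_goals
        rw [ih _ hlen' (some v) _ hsort' hprev', hcard]
        constructor
      all_goals
        rintro (⟨w, hw, hw1, hwc⟩ | hnum)
      all_goals try (right; split_ifs at hnum ⊢ <;> omega)
      all_goals first
      | (-- w taken from the tail call: lift it to v :: rest
         have hwv : w ≠ v := fun h => hvnot (h ▸ hw)
         refine Or.inl ⟨w, (hmem w).mpr (Or.inr hw), by rw [hcw w hwv]; exact hw1, ?_⟩
         rcases hwc with h | h | h | h
         · exact Or.inl h
         · exact Or.inr (Or.inl (by rw [hcw w hwv]; exact h))
         · exact Or.inr (Or.inr (Or.inr ((hmem _).mpr (Or.inl (Option.some.inj h).symm))))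
         · exact Or.inr (Or.inr (Or.inr ((hmem _).mpr (Or.inr h)))))
      | (-- backward: w in v :: rest
         rcases (hmem w).mp hw with rfl | hw'
         · exfalso
           rcases hwc with h | h | h | h
           · exact hcond ⟨by omega, Or.inl h⟩
           · exact hcond ⟨by omega, Or.inr (Or.inl (by omega))⟩
           · exact hcond ⟨by omega, Or.inr (Or.inr h)⟩
           · exact hpredout h
         · have hwv : w ≠ v := fun h => hvnot (h ▸ hw')
           have hvw : v < w := hlt w hw'
           refine Or.inl ⟨w, hw', by rw [← hcw w hwv]; exact hw1, ?_⟩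
           rcases hwc with h | h | h | h
           · exact Or.inl h
           · exact Or.inr (Or.inl (by rw [← hcw w hwv]; exact h))
           · exfalso
             have := hprevlt _ h
             omega
           · rcases (hmem _).mp h with h' | h'
             · exact Or.inr (Or.inr (Or.inl (by rw [h'])))
             · exact Or.inr (Or.inr (Or.inr h')))

theorem winSpec_perm (s l : List Int) (hp : s.Perm l) : winSpec s ↔ winSpec l := by
  have hc : ∀ v, s.count v = l.count v := fun v => hp.count_eq v
  have hm : ∀ v : Int, v ∈ s ↔ v ∈ l := fun v => hp.mem_iff
  have hf : s.toFinset = l.toFinset := by ext w; simp only [List.mem_toFinset]; exact hm w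
  unfold winSpec
  simp only [hc, hm, hf]

theorem b_iff (nims : List Int) (n : Int) :
    is_winning_state_alt nims n = true ↔ winSpec nims := by
  unfold is_winning_state_alt
  have hperm : (PySem.List.sorted nims (fun x => x) false).Perm nims := PySem.List.sorted_perm ..
  rw [← winSpec_perm _ _ hperm]
  have hsort : (PySem.List.sorted nims (fun x => x) false).Pairwise (· ≤ ·) := by
    have := PySem.List.sorted_pairwise nims (fun x => x)
    simpa using this
  rw [bLoop_iff (PySem.List.sorted nims (fun x => x) false).length _ le_rfl none 0 hsort
    (by rintro p hp; cases hp)]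
  unfold winSpec
  set s := PySem.List.sorted nims (fun x => x) false with hs
  constructor
  · rintro (⟨v, hv, h1, hc⟩ | hnum)
    · rcases hc with rfl | h | h | h
      · exact Or.inl h1
      · exact Or.inr (Or.inl ⟨v, hv, h⟩)
      · cases h
      · exact Or.inr (Or.inr (Or.inl ⟨v, hv, h1, h⟩))
    · exact Or.inr (Or.inr (Or.inr (by omega)))
  · rintro (hz | ⟨v, hv, hc⟩ | ⟨v, hv, h1, hm⟩ | hcard)
    · refine Or.inl ⟨0, ?_, hz, Or.inl rfl⟩
      exact List.count_pos_iff.mp (by exact_mod_cast (by omega : (0:Int) < (s.count 0 : Int)))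
    · exact Or.inl ⟨v, hv, by omega, Or.inr (Or.inl hc)⟩
    · exact Or.inl ⟨v, hv, h1, Or.inr (Or.inr (Or.inr hm))⟩
    · right; omega

-- ===== VERDICT (by name: the statement is the Claim_ definition above) =====
theorem is_winning_state_spec : Claim_equal_is_winning_state := by
  intro nims n _
  unfold Spec_is_winning_state
  exact Bool.coe_iff_coe.mp ((a_iff nims n).trans (b_iff nims n).symm)
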